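-- pv_equiv track=rewrite | github.com/sdehoog/AoC_2022 | Day 18/day18.py | find_air
-- ===== SOURCE A (Python) =====
-- def tuple_add(a: tuple, b: tuple) -> tuple:
--     return tuple([c + d for c, d in zip(a, b)])
--
-- def get_adjacent(x: tuple) -> list[tuple, ...]:
--     return [
--         tuple_add(x, tuple([
--             j if k == y else 0
--             for k in range(len(x))
--         ]))
--         for j in [-1, 1]
--         for y in range(len(x))
--     ]
--
-- def find_air(current_point: tuple, air_points: set, rock_points, surface_area: int, valid_range):
--     air_points.add(current_point)
--     for point in get_adjacent(current_point):
--         if ((valid_range[0][0] <= point[0] <= valid_range[0][1] and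
--              valid_range[1][0] <= point[1] <= valid_range[1][1]) and
--                 valid_range[2][0] <= point[2] <= valid_range[2][1]):
--             pass
--         else:
--             continue
--         if point in rock_points:
--             surface_area += 1
--         elif ((valid_range[0][0] > point[0] > valid_range[0][1] or
--               valid_range[1][0] > point[1] > valid_range[1][1]) or
--               valid_range[2][0] > point[2] > valid_range[2][1]):
--             continue
--         elif point in air_points:
--             continue
--         else:
--             air_points, surface_area = find_air(point, air_points, rock_points, surface_area, valid_range)
--
--     return air_points, surface_area
-- ===== SOURCE B (Python) =====
-- def find_air(current_point, air_points, rock_points, surface_area, valid_range):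
--     (xlo, xhi) = valid_range[0]
--     (ylo, yhi) = valid_range[1]
--     (zlo, zhi) = valid_range[2]
--     stack = []
--     point = current_point
--     while point is not None:
--         air_points.add(point)
--         x, y, z = point
--         for nb in ((x, y, z + 1), (x, y + 1, z), (x + 1, y, z),
--                    (x, y, z - 1), (x, y - 1, z), (x - 1, y, z)):
--             if xlo <= nb[0] <= xhi and ylo <= nb[1] <= yhi and zlo <= nb[2] <= zhi:
--                 if nb in rock_points:
--                     surface_area += 1
--                 else:
--                     stack.append(nb)
--         point = None
--         while stack:
--             cand = stack.pop()
--             if cand not in air_points: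
--                 point = cand
--                 break
--     return air_points, surface_area
-- ===== Notes on version B (the rewrite author's own statement) =====
-- stated objective: alternative
-- what changed: Replaces A's recursive flood-fill (one Python call frame per air cell, plus an unreachable contradictory elif) by an iterative DFS over an explicit stack: pop a cell, skip it if already in air, otherwise mark it, count its in-range rock faces and push its in-range non-rock neighbours.
-- outside the precondition, e.g. on find_air((0, 0, 0), set(), set(), 0, [(-10, -5)]): A returns ({(0, 0, 0)}, 0), B raises IndexError
import Mathlib
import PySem

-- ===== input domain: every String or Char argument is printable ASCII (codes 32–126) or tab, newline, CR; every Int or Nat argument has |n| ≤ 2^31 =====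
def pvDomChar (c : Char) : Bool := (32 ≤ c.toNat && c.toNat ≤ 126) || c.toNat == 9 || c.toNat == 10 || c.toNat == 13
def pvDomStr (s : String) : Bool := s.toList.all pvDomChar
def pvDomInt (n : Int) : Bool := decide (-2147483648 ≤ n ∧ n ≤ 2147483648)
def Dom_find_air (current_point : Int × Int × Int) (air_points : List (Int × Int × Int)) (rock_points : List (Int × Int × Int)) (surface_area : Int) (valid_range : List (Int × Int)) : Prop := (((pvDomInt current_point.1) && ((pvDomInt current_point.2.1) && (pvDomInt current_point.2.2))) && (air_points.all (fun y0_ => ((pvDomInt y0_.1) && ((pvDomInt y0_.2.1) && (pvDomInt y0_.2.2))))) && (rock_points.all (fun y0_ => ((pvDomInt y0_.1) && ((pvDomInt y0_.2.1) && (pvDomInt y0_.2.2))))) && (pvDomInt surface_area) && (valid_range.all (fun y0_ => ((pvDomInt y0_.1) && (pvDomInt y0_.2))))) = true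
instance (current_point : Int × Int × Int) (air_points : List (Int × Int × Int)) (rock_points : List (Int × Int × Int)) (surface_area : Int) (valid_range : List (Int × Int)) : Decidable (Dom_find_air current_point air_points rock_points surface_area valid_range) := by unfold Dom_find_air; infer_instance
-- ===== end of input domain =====

-- B replaces A's recursive flood-fill by an iterative DFS over an explicit stack (same return
-- value; like A it also mutates the passed-in air set in place in Python, which the caller observes).

-- ---- termination measure machinery (cited by the ports' `decreasing_by`; not part of either algorithm) ----

/-- The integers lo..hi as a list (only used as a termination measure, never computed). -/
def pvIvals (lo hi : Int) : List Int := (List.range (hi + 1 - lo).toNat).map (fun i => lo + (i : Int))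

theorem pv_mem_ivals {lo hi a : Int} : a ∈ pvIvals lo hi ↔ lo ≤ a ∧ a ≤ hi := by
  unfold pvIvals
  simp only [List.mem_map]
  constructor
  · rintro ⟨i, hi1, rfl⟩
    simp only [List.pure_def, List.bind_eq_flatMap, List.mem_flatMap, List.mem_range,
      Int.lt_toNat, List.mem_cons, List.not_mem_nil, or_false] at hi1
    obtain ⟨j, hj, rfl⟩ := hi1
    omega
  · rintro ⟨h1, h2⟩
    refine ⟨a - lo, ?_, by omega⟩
    simp only [List.pure_def, List.bind_eq_flatMap, List.mem_flatMap, List.mem_range,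
      Int.lt_toNat, List.mem_cons, List.not_mem_nil, or_false]
    exact ⟨(a - lo).toNat, by omega, by omega⟩

/-- All cells inside the valid box (termination measure only). -/
def pvGrid (r0 r1 r2 : Int × Int) : List (Int × Int × Int) :=
  (pvIvals r0.1 r0.2).flatMap (fun a =>
    (pvIvals r1.1 r1.2).flatMap (fun b =>
      (pvIvals r2.1 r2.2).map (fun c => (a, b, c))))

theorem pv_mem_grid {r0 r1 r2 : Int × Int} {p : Int × Int × Int} :
    p ∈ pvGrid r0 r1 r2 ↔ (r0.1 ≤ p.1 ∧ p.1 ≤ r0.2) ∧ (r1.1 ≤ p.2.1 ∧ p.2.1 ≤ r1.2) ∧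
      (r2.1 ≤ p.2.2 ∧ p.2.2 ≤ r2.2) := by
  obtain ⟨x, y, z⟩ := p
  simp [pvGrid, pv_mem_ivals]

/-- Number of in-box cells not yet in `air` (termination measure for both ports). -/
def pvFree (r0 r1 r2 : Int × Int) (air : List (Int × Int × Int)) : Nat :=
  ((pvGrid r0 r1 r2).filter (fun c => !air.contains c)).length

theorem pv_contains_false_iff (l : List (Int × Int × Int)) (x : Int × Int × Int) :
    (!l.contains x) = true ↔ x ∉ l := by
  simp

theorem pv_filter_length_mono {α : Type} (l : List α) (p q : α → Bool)
    (h : ∀ a ∈ l, p a = true → q a = true) : (l.filter p).length ≤ (l.filter q).length := by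
  induction l with
  | nil => simp
  | cons x xs ih =>
    have ih' := ih (fun a ha hp => h a (List.mem_cons_of_mem _ ha) hp)
    by_cases hp : p x = true
    · simp [hp, h x (List.mem_cons_self) hp]; omega
    · simp only [List.filter_cons]
      rw [Bool.not_eq_true] at hp
      simp only [hp]
      rcases hq : q x <;> simp <;> omega

theorem pvFree_le_of_subset {r0 r1 r2 : Int × Int} {a b : List (Int × Int × Int)}
    (h : ∀ x ∈ a, x ∈ b) : pvFree r0 r1 r2 b ≤ pvFree r0 r1 r2 a := by
  apply pv_filter_length_mono
  intro c _ hc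
  rw [pv_contains_false_iff] at hc ⊢
  exact fun hm => hc (h c hm)

theorem pvFree_le_add {r0 r1 r2 : Int × Int} (air : List (Int × Int × Int)) (p : Int × Int × Int) :
    pvFree r0 r1 r2 (PySem.Set.add air p) ≤ pvFree r0 r1 r2 air := by
  apply pvFree_le_of_subset
  intro x hx; exact (PySem.Set.mem_add _ _ _).mpr (Or.inl hx)

theorem pvFree_add_lt {r0 r1 r2 : Int × Int} {air : List (Int × Int × Int)} {p : Int × Int × Int}
    (hg : p ∈ pvGrid r0 r1 r2) (hp : air.contains p = false) :
    pvFree r0 r1 r2 (PySem.Set.add air p) < pvFree r0 r1 r2 air := by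
  have hnm : p ∉ air := by rw [← List.contains_iff_mem, hp]; simp
  obtain ⟨l1, l2, heq⟩ := List.mem_iff_append.mp hg
  unfold pvFree
  rw [heq]
  have hmem : p ∈ PySem.Set.add air p := (PySem.Set.mem_add _ _ _).mpr (Or.inr rfl)
  have hmono : ∀ l : List (Int × Int × Int),
      (l.filter (fun c => !List.contains (PySem.Set.add air p) c)).length ≤
      (l.filter (fun c => !List.contains air c)).length := by
    intro l
    apply pv_filter_length_mono
    intro c _ hc
    rw [pv_contains_false_iff] at hc ⊢
    exact fun hm => hc ((PySem.Set.mem_add _ _ _).mpr (Or.inl hm))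
  have h1 := hmono l1
  have h2 := hmono l2
  have hc1 : (!List.contains (PySem.Set.add air p) p) = false := by
    rw [List.contains_iff_mem.mpr hmem]
    rfl
  have hc2 : (!List.contains air p) = true := by
    rw [hp]
    rfl
  simp only [List.filter_append, List.filter_cons, List.length_append, hc1, hc2,
    Bool.false_eq_true, if_false, if_true, List.length_cons]
  omega

-- ===== PORT A =====
-- get_adjacent, specialised (as A uses it) to 3-tuples: j=-1 then j=1, axis 0,1,2.
def adjacentA (x : Int × Int × Int) : List (Int × Int × Int) :=
  [ (x.1 - 1, x.2.1, x.2.2), (x.1, x.2.1 - 1, x.2.2), (x.1, x.2.1, x.2.2 - 1),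
    (x.1 + 1, x.2.1, x.2.2), (x.1, x.2.1 + 1, x.2.2), (x.1, x.2.1, x.2.2 + 1) ]

-- A's chained bound check 'valid_range[0][0] <= point[0] <= valid_range[0][1] and ...'.
def inRangeA (r0 r1 r2 : Int × Int) (p : Int × Int × Int) : Bool :=
  (decide (r0.1 ≤ p.1) && decide (p.1 ≤ r0.2)) && (decide (r1.1 ≤ p.2.1) && decide (p.2.1 ≤ r1.2)) &&
    (decide (r2.1 ≤ p.2.2) && decide (p.2.2 ≤ r2.2))

-- A's (unreachable) second elif condition, kept literally.
def contraA (r0 r1 r2 : Int × Int) (p : Int × Int × Int) : Bool :=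
  ((decide (r0.1 > p.1) && decide (p.1 > r0.2)) || (decide (r1.1 > p.2.1) && decide (p.2.1 > r1.2))) ||
    (decide (r2.1 > p.2.2) && decide (p.2.2 > r2.2))

/-- A's recursion, written as one recursion over the pending adjacency list: `find_air point …`
    is `coreLoopA (adjacentA point) (air.add point) sa`.  The subtype result (the air set only
    grows) is termination machinery only. -/
def coreLoopA (rock : List (Int × Int × Int)) (r0 r1 r2 : Int × Int) :
    (pts : List (Int × Int × Int)) → (air : List (Int × Int × Int)) → (sa : Int) →
      {r : List (Int × Int × Int) × Int // ∀ x ∈ air, x ∈ r.1}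
  | [], air, sa => ⟨(air, sa), fun _ h => h⟩
  | p :: rest, air, sa =>
    if hin : inRangeA r0 r1 r2 p then
      if rock.contains p then
        let r := coreLoopA rock r0 r1 r2 rest air (sa + 1); ⟨r.1, r.2⟩
      else if contraA r0 r1 r2 p then
        let r := coreLoopA rock r0 r1 r2 rest air sa; ⟨r.1, r.2⟩
      else if hair : air.contains p then
        let r := coreLoopA rock r0 r1 r2 rest air sa; ⟨r.1, r.2⟩
      else
        let r := coreLoopA rock r0 r1 r2 (adjacentA p) (PySem.Set.add air p) sa
        let r' := coreLoopA rock r0 r1 r2 rest r.1.1 r.1.2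
        ⟨r'.1, fun x hx => r'.2 x (r.2 x ((PySem.Set.mem_add _ _ _).mpr (Or.inl hx)))⟩
    else
      let r := coreLoopA rock r0 r1 r2 rest air sa; ⟨r.1, r.2⟩
termination_by pts air _ => (pvFree r0 r1 r2 air, pts.length)
decreasing_by
  · exact Prod.Lex.right _ (by simp)
  · exact Prod.Lex.right _ (by simp)
  · exact Prod.Lex.right _ (by simp)
  · apply Prod.Lex.left
    apply pvFree_add_lt _ (by simpa using hair)
    rw [pv_mem_grid]
    simp only [inRangeA, Bool.and_eq_true, decide_eq_true_eq] at hin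
    tauto
  · have h1 : pvFree r0 r1 r2 r.1.1 ≤ pvFree r0 r1 r2 air := by
      refine le_trans (pvFree_le_of_subset ?_) (pvFree_le_add air p)
      exact r.2
    rcases lt_or_eq_of_le h1 with h | h
    · exact Prod.Lex.left _ _ h
    · rw [h]; exact Prod.Lex.right _ (by simp)
  · exact Prod.Lex.right _ (by simp)

-- A evaluates valid_range[0]/[1]/[2] lazily inside the bound checks; under Pre_ (length ≥ 3)
-- all three lookups succeed.  The fallback branch is outside Pre_ and never claimed about.
def find_air (current_point : Int × Int × Int) (air_points : List (Int × Int × Int)) (rock_points : List (Int × Int × Int)) (surface_area : Int) (valid_range : List (Int × Int)) : (List (Int × Int × Int)) × Int :=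
  match PySem.List.pyGet? valid_range 0, PySem.List.pyGet? valid_range 1, PySem.List.pyGet? valid_range 2 with
  | some r0, some r1, some r2 =>
    (coreLoopA rock_points r0 r1 r2 (adjacentA current_point)
      (PySem.Set.add air_points current_point) surface_area).1
  | _, _, _ => (PySem.Set.add air_points current_point, surface_area)

-- ===== PORT B =====
-- Source B's bound check 'xlo <= nb[0] <= xhi and ...'.
def inB (r0 r1 r2 : Int × Int) (p : Int × Int × Int) : Bool :=
  (decide (r0.1 ≤ p.1) && decide (p.1 ≤ r0.2)) && (decide (r1.1 ≤ p.2.1) && decide (p.2.1 ≤ r1.2)) &&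
    (decide (r2.1 ≤ p.2.2) && decide (p.2.2 ≤ r2.2))

-- the neighbour tuple Source B scans, in its written order
def neighboursB (p : Int × Int × Int) : List (Int × Int × Int) :=
  [ (p.1, p.2.1, p.2.2 + 1), (p.1, p.2.1 + 1, p.2.2), (p.1 + 1, p.2.1, p.2.2),
    (p.1, p.2.1, p.2.2 - 1), (p.1, p.2.1 - 1, p.2.2), (p.1 - 1, p.2.1, p.2.2) ]

-- Source B's inner 'for nb in …' loop: count rock faces, push the rest (stack head = Python list end).
def scanB (rock : List (Int × Int × Int)) (r0 r1 r2 : Int × Int) :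
    List (Int × Int × Int) → List (Int × Int × Int) → Int → List (Int × Int × Int) × Int
  | [], st, sa => (st, sa)
  | nb :: rest, st, sa =>
    if inB r0 r1 r2 nb then
      if rock.contains nb then scanB rock r0 r1 r2 rest st (sa + 1)
      else scanB rock r0 r1 r2 rest (nb :: st) sa
    else scanB rock r0 r1 r2 rest st sa

-- Source B's inner 'while stack' pop loop: first popped candidate not yet in air, with the rest of the stack.
def nextB (air : List (Int × Int × Int)) :
    List (Int × Int × Int) → Option ((Int × Int × Int) × List (Int × Int × Int))
  | [] => none
  | c :: rest => if air.contains c then nextB air rest else some (c, rest)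

theorem nextB_mem {air : List (Int × Int × Int)} :
    ∀ {st cand rest}, nextB air st = some (cand, rest) →
      cand ∈ st ∧ air.contains cand = false ∧ ∀ x ∈ rest, x ∈ st
  | [], _, _, h => by simp [nextB] at h
  | c :: st, cand, rest, h => by
    rw [nextB] at h
    by_cases hc : air.contains c = true
    · simp only [hc, if_true] at h
      obtain ⟨h1, h2, h3⟩ := nextB_mem h
      exact ⟨List.mem_cons_of_mem _ h1, h2, fun x hx => List.mem_cons_of_mem _ (h3 x hx)⟩
    · simp only [Bool.not_eq_true] at hc
      simp only [hc, Bool.false_eq_true, if_false, Option.some.injEq, Prod.mk.injEq] at h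
      obtain ⟨rfl, rfl⟩ := h
      exact ⟨List.mem_cons_self, hc, fun x hx => List.mem_cons_of_mem _ hx⟩

theorem scanB_mem {rock : List (Int × Int × Int)} {r0 r1 r2 : Int × Int} :
    ∀ {l st : List (Int × Int × Int)} {sa : Int} {c},
      c ∈ (scanB rock r0 r1 r2 l st sa).1 → inB r0 r1 r2 c = true ∨ c ∈ st
  | [], st, sa, c, h => Or.inr (by simpa [scanB] using h)
  | nb :: rest, st, sa, c, h => by
    rw [scanB] at h
    by_cases h1 : inB r0 r1 r2 nb = true
    · simp only [h1, if_true] at h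
      by_cases h2 : rock.contains nb = true
      · simp only [h2, if_true] at h; exact scanB_mem h
      · simp only [h2, Bool.false_eq_true, if_false] at h
        rcases scanB_mem h with h3 | h3
        · exact Or.inl h3
        · rcases List.mem_cons.mp h3 with rfl | h4
          · exact Or.inl h1
          · exact Or.inr h4
    · simp only [Bool.not_eq_true] at h1
      simp only [h1, Bool.false_eq_true, if_false] at h
      exact scanB_mem h

/-- Source B's outer 'while point is not None' loop.  `hst` (every stacked cell passed the bound
    check when pushed) is termination machinery only. -/
def goB (rock : List (Int × Int × Int)) (r0 r1 r2 : Int × Int) (point : Int × Int × Int)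
    (stack : List (Int × Int × Int)) (air : List (Int × Int × Int)) (sa : Int)
    (hst : ∀ c ∈ stack, inB r0 r1 r2 c = true) : List (Int × Int × Int) × Int :=
  let air1 := PySem.Set.add air point
  let s1 := scanB rock r0 r1 r2 (neighboursB point) stack sa
  match hn : nextB air1 s1.1 with
  | none => (air1, s1.2)
  | some (cand, rest) =>
    goB rock r0 r1 r2 cand rest air1 s1.2
      (fun c hc => by
        rcases scanB_mem ((nextB_mem hn).2.2 c hc) with h | h
        · exact h
        · exact hst c h)
termination_by pvFree r0 r1 r2 (PySem.Set.add air point)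
decreasing_by
  obtain ⟨hmem, hfree, -⟩ := nextB_mem hn
  apply pvFree_add_lt _ hfree
  rw [pv_mem_grid]
  have hin : inB r0 r1 r2 cand = true := by
    rcases scanB_mem hmem with h | h
    · exact h
    · exact hst cand h
  simp only [inB, Bool.and_eq_true, decide_eq_true_eq] at hin
  tauto

def find_air_alt (current_point : Int × Int × Int) (air_points : List (Int × Int × Int)) (rock_points : List (Int × Int × Int)) (surface_area : Int) (valid_range : List (Int × Int)) : (List (Int × Int × Int)) × Int :=
  match PySem.List.pyGet? valid_range 0 with
  | none => (air_points, surface_area)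
  | some r0 =>
    match PySem.List.pyGet? valid_range 1 with
    | none => (air_points, surface_area)
    | some r1 =>
      match PySem.List.pyGet? valid_range 2 with
      | none => (air_points, surface_area)
      | some r2 =>
        goB rock_points r0 r1 r2 current_point [] air_points surface_area (by simp)

-- ===== PRECONDITION & SPEC =====
-- Pre_ requires valid_range to carry the three axis ranges the bound checks index.  On shorter
-- lists A raises IndexError, EXCEPT when every scanned neighbour already fails an earlier,
-- lazily evaluated bound check, in which case A still returns while B's up-front unpacking of
-- valid_range[0..2] raises; those returning inputs are excluded (example in claim.json "cites").
def Pre_find_air (current_point : Int × Int × Int) (air_points : List (Int × Int × Int)) (rock_points : List (Int × Int × Int)) (surface_area : Int) (valid_range : List (Int × Int)) : Prop := 3 ≤ valid_range.length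
instance (current_point : Int × Int × Int) (air_points : List (Int × Int × Int)) (rock_points : List (Int × Int × Int)) (surface_area : Int) (valid_range : List (Int × Int)) : Decidable (Pre_find_air current_point air_points rock_points surface_area valid_range) := by unfold Pre_find_air; infer_instance

def pvWitness_find_air : (Int × Int × Int) × (List (Int × Int × Int)) × (List (Int × Int × Int)) × Int × (List (Int × Int)) :=
  ((0, 0, 0), [], [(1, 0, 0)], 0, [(0, 1), (0, 1), (0, 1)])

def Spec_find_air (current_point : Int × Int × Int) (air_points : List (Int × Int × Int)) (rock_points : List (Int × Int × Int)) (surface_area : Int) (valid_range : List (Int × Int)) (out : (List (Int × Int × Int)) × Int) : Prop := out = find_air_alt current_point air_points rock_points surface_area valid_range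
instance (current_point : Int × Int × Int) (air_points : List (Int × Int × Int)) (rock_points : List (Int × Int × Int)) (surface_area : Int) (valid_range : List (Int × Int)) (out : (List (Int × Int × Int)) × Int) : Decidable (Spec_find_air current_point air_points rock_points surface_area valid_range out) := by unfold Spec_find_air; infer_instance

-- ===== CLAIM (what is proved, stated in full; the proofs are below) =====
def Claim_equal_find_air : Prop := ∀ (current_point : Int × Int × Int) (air_points : List (Int × Int × Int)) (rock_points : List (Int × Int × Int)) (surface_area : Int) (valid_range : List (Int × Int)), Dom_find_air current_point air_points rock_points surface_area valid_range → Pre_find_air current_point air_points rock_points surface_area valid_range → Spec_find_air current_point air_points rock_points surface_area valid_range (find_air current_point air_points rock_points surface_area valid_range)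

-- ===== LEMMAS AND PROOFS =====

-- plain-pair view of A's recursion (the subtype is termination machinery only)
def coreVal (rock : List (Int × Int × Int)) (r0 r1 r2 : Int × Int)
    (pts air : List (Int × Int × Int)) (sa : Int) : List (Int × Int × Int) × Int :=
  (coreLoopA rock r0 r1 r2 pts air sa).1

theorem coreVal_nil (rock : List (Int × Int × Int)) (r0 r1 r2 : Int × Int)
    (air : List (Int × Int × Int)) (sa : Int) :
    coreVal rock r0 r1 r2 [] air sa = (air, sa) := by
  simp [coreVal, coreLoopA]

theorem coreVal_cons (rock : List (Int × Int × Int)) (r0 r1 r2 : Int × Int)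
    (p : Int × Int × Int) (rest air : List (Int × Int × Int)) (sa : Int) :
    coreVal rock r0 r1 r2 (p :: rest) air sa =
      if inRangeA r0 r1 r2 p then
        if rock.contains p then coreVal rock r0 r1 r2 rest air (sa + 1)
        else if contraA r0 r1 r2 p then coreVal rock r0 r1 r2 rest air sa
        else if List.contains air p then coreVal rock r0 r1 r2 rest air sa
        else coreVal rock r0 r1 r2 rest
          (coreVal rock r0 r1 r2 (adjacentA p) (PySem.Set.add air p) sa).1
          (coreVal rock r0 r1 r2 (adjacentA p) (PySem.Set.add air p) sa).2
      else coreVal rock r0 r1 r2 rest air sa := by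
  simp only [coreVal, coreLoopA]
  split_ifs <;> rfl

-- reference form of A's recursion: process a worklist of cells left to right, flood-filling
-- from each cell that is not yet air (proof-only device connecting the two ports)
def drain (rock : List (Int × Int × Int)) (r0 r1 r2 : Int × Int) :
    List (Int × Int × Int) → List (Int × Int × Int) → Int → List (Int × Int × Int) × Int
  | [], air, sa => (air, sa)
  | c :: rest, air, sa =>
    if List.contains air c then drain rock r0 r1 r2 rest air sa
    else
      let r := coreLoopA rock r0 r1 r2 (adjacentA c) (PySem.Set.add air c) sa
      drain rock r0 r1 r2 rest r.1.1 r.1.2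
termination_by pts air _ => (pvFree r0 r1 r2 air, pts.length)
decreasing_by
  · exact Prod.Lex.right _ (by simp)
  · have h1 : pvFree r0 r1 r2 r.1.1 ≤ pvFree r0 r1 r2 air := by
      refine le_trans (pvFree_le_of_subset ?_) (pvFree_le_add air c)
      exact r.2
    rcases lt_or_eq_of_le h1 with h | h
    · exact Prod.Lex.left _ _ h
    · rw [h]; exact Prod.Lex.right _ (by simp)

theorem drain_nil (rock : List (Int × Int × Int)) (r0 r1 r2 : Int × Int)
    (air : List (Int × Int × Int)) (sa : Int) :
    drain rock r0 r1 r2 [] air sa = (air, sa) := by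
  rw [drain]

theorem drain_cons (rock : List (Int × Int × Int)) (r0 r1 r2 : Int × Int)
    (c : Int × Int × Int) (rest air : List (Int × Int × Int)) (sa : Int) :
    drain rock r0 r1 r2 (c :: rest) air sa =
      if List.contains air c then drain rock r0 r1 r2 rest air sa
      else drain rock r0 r1 r2 rest
        (coreVal rock r0 r1 r2 (adjacentA c) (PySem.Set.add air c) sa).1
        (coreVal rock r0 r1 r2 (adjacentA c) (PySem.Set.add air c) sa).2 := by
  rw [drain]
  rfl

theorem contraA_false {r0 r1 r2 : Int × Int} {p : Int × Int × Int}
    (h : inRangeA r0 r1 r2 p = true) : contraA r0 r1 r2 p = false := by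
  simp only [inRangeA, Bool.and_eq_true, decide_eq_true_eq] at h
  simp only [contraA, Bool.or_eq_false_iff, Bool.and_eq_false_iff, decide_eq_false_iff_not,
    not_lt, gt_iff_lt]
  omega

-- the surface-area accumulator flows additively through A's recursion
theorem coreVal_shift (rock : List (Int × Int × Int)) (r0 r1 r2 : Int × Int)
    (pts : List (Int × Int × Int)) (air : List (Int × Int × Int)) (sa0 : Int) :
    ∀ sa : Int, (coreVal rock r0 r1 r2 pts air sa).1 = (coreVal rock r0 r1 r2 pts air 0).1 ∧
      (coreVal rock r0 r1 r2 pts air sa).2 = (coreVal rock r0 r1 r2 pts air 0).2 + sa := by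
  induction pts, air, sa0 using coreLoopA.induct rock r0 r1 r2 with
  | case1 air sa0 => intro sa; simp [coreVal_nil]
  | case2 p rest air sa0 hin hrock ih =>
    intro sa
    simp only [coreVal_cons, hin, hrock, if_true]
    obtain ⟨e1, e2⟩ := ih (sa + 1)
    obtain ⟨g1, g2⟩ := ih (0 + 1)
    exact ⟨e1.trans g1.symm, by omega⟩
  | case3 p rest air sa0 hin hrock hcontra ih =>
    intro sa
    simp only [Bool.not_eq_true] at hrock
    simp only [coreVal_cons, hin, hrock, hcontra, Bool.false_eq_true, if_true, if_false]
    exact ih sa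
  | case4 p rest air sa0 hin hrock hcontra hair ih =>
    intro sa
    simp only [Bool.not_eq_true] at hrock hcontra
    simp only [coreVal_cons, hin, hrock, hcontra, hair, Bool.false_eq_true, if_true, if_false]
    exact ih sa
  | case5 p rest air sa0 hin hrock hcontra hair r ih1 ih2 ih3 =>
    intro sa
    simp only [Bool.not_eq_true] at hrock hcontra hair
    simp only [coreVal_cons, hin, hrock, hcontra, hair, Bool.false_eq_true, if_true, if_false]
    have ih3' : ∀ sa : Int,
        (coreVal rock r0 r1 r2 rest
            (coreVal rock r0 r1 r2 (adjacentA p) (PySem.Set.add air p) sa0).1 sa).1 =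
          (coreVal rock r0 r1 r2 rest
            (coreVal rock r0 r1 r2 (adjacentA p) (PySem.Set.add air p) sa0).1 0).1 ∧
        (coreVal rock r0 r1 r2 rest
            (coreVal rock r0 r1 r2 (adjacentA p) (PySem.Set.add air p) sa0).1 sa).2 =
          (coreVal rock r0 r1 r2 rest
            (coreVal rock r0 r1 r2 (adjacentA p) (PySem.Set.add air p) sa0).1 0).2 + sa := ih3
    obtain ⟨a1, a2⟩ := ih1 sa
    have h0 := (ih1 sa0).1
    rw [a1, a2]
    rw [h0] at ih3'
    obtain ⟨b1, b2⟩ :=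
      ih3' ((coreVal rock r0 r1 r2 (adjacentA p) (PySem.Set.add air p) 0).2 + sa)
    obtain ⟨c1, c2⟩ :=
      ih3' ((coreVal rock r0 r1 r2 (adjacentA p) (PySem.Set.add air p) 0).2)
    exact ⟨b1.trans c1.symm, by omega⟩
  | case6 p rest air sa0 hin ih =>
    intro sa
    simp only [Bool.not_eq_true] at hin
    simp only [coreVal_cons, hin, Bool.false_eq_true, if_false]
    exact ih sa

-- A's loop over a pending list is drain over its eligible (in-range, non-rock) members,
-- with all in-range rock faces of the list counted up front
theorem coreVal_eq_drain (rock : List (Int × Int × Int)) (r0 r1 r2 : Int × Int)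
    (pts : List (Int × Int × Int)) (air : List (Int × Int × Int)) (sa0 : Int) :
    ∀ sa : Int, coreVal rock r0 r1 r2 pts air sa =
      drain rock r0 r1 r2 (pts.filter (fun q => inRangeA r0 r1 r2 q && !rock.contains q)) air
        (sa + ((pts.filter (fun q => inRangeA r0 r1 r2 q && rock.contains q)).length : Int)) := by
  induction pts, air, sa0 using coreLoopA.induct rock r0 r1 r2 with
  | case1 air sa0 => intro sa; simp [coreVal_nil, drain_nil]
  | case2 p rest air sa0 hin hrock ih =>
    intro sa
    simp only [coreVal_cons, hin, hrock, if_true, List.filter_cons]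
    rw [if_neg (by simp), if_pos (by simp)]
    rw [ih (sa + 1)]
    congr 1
    simp only [List.length_cons]
    push_cast
    omega
  | case3 p rest air sa0 hin hrock hcontra ih =>
    rw [contraA_false hin] at hcontra
    simp at hcontra
  | case4 p rest air sa0 hin hrock hcontra hair ih =>
    intro sa
    simp only [Bool.not_eq_true] at hrock hcontra
    simp only [coreVal_cons, hin, hrock, hcontra, hair, Bool.false_eq_true, if_true, if_false,
      List.filter_cons]
    rw [if_pos (by simp), if_neg (by simp)]
    rw [drain_cons, if_pos hair]
    exact ih sa
  | case5 p rest air sa0 hin hrock hcontra hair r ih1 ih2 ih3 =>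
    intro sa
    simp only [Bool.not_eq_true] at hrock hcontra hair
    simp only [coreVal_cons, hin, hrock, hcontra, hair, Bool.false_eq_true, if_true, if_false,
      List.filter_cons]
    rw [if_pos (by simp), if_neg (by simp)]
    rw [drain_cons, if_neg (by rw [hair]; exact Bool.false_ne_true)]
    have ih3' : ∀ sa : Int,
        coreVal rock r0 r1 r2 rest
            (coreVal rock r0 r1 r2 (adjacentA p) (PySem.Set.add air p) sa0).1 sa =
          drain rock r0 r1 r2 (rest.filter (fun q => inRangeA r0 r1 r2 q && !rock.contains q))
            (coreVal rock r0 r1 r2 (adjacentA p) (PySem.Set.add air p) sa0).1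
            (sa + ((rest.filter (fun q => inRangeA r0 r1 r2 q && rock.contains q)).length : Int)) :=
      ih3
    have h0 := (coreVal_shift rock r0 r1 r2 (adjacentA p) (PySem.Set.add air p) 0 sa0).1
    rw [h0] at ih3'
    -- left side: shift the inner accumulator out
    obtain ⟨a1, a2⟩ := coreVal_shift rock r0 r1 r2 (adjacentA p) (PySem.Set.add air p) 0 sa
    rw [a1, a2, ih3' _]
    -- right side: same, with sa + count
    obtain ⟨b1, b2⟩ := coreVal_shift rock r0 r1 r2 (adjacentA p) (PySem.Set.add air p) 0
      (sa + ((rest.filter (fun q => inRangeA r0 r1 r2 q && rock.contains q)).length : Int))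
    rw [b1, b2]
    congr 1
    omega
  | case6 p rest air sa0 hin ih =>
    intro sa
    simp only [Bool.not_eq_true] at hin
    simp only [coreVal_cons, hin, Bool.false_eq_true, if_false, List.filter_cons]
    rw [if_neg (by simp), if_neg (by simp)]
    exact ih sa

theorem drain_append (rock : List (Int × Int × Int)) (r0 r1 r2 : Int × Int)
    (l1 : List (Int × Int × Int)) :
    ∀ (l2 air : List (Int × Int × Int)) (sa : Int),
      drain rock r0 r1 r2 (l1 ++ l2) air sa =
        drain rock r0 r1 r2 l2 (drain rock r0 r1 r2 l1 air sa).1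
          (drain rock r0 r1 r2 l1 air sa).2 := by
  induction l1 with
  | nil => intro l2 air sa; simp [drain_nil]
  | cons c cs ih =>
    intro l2 air sa
    rw [List.cons_append, drain_cons, drain_cons]
    by_cases hc : List.contains air c = true
    · simp only [hc, if_true]
      exact ih l2 air sa
    · simp only [hc]
      exact ih l2 _ _

theorem drain_skips (rock : List (Int × Int × Int)) (r0 r1 r2 : Int × Int)
    (l : List (Int × Int × Int)) :
    ∀ (air : List (Int × Int × Int)) (sa : Int), (∀ c ∈ l, List.contains air c = true) →
      drain rock r0 r1 r2 l air sa = (air, sa) := by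
  induction l with
  | nil => intro air sa _; exact drain_nil rock r0 r1 r2 air sa
  | cons c cs ih =>
    intro air sa h
    rw [drain_cons, if_pos (h c List.mem_cons_self)]
    exact ih air sa (fun x hx => h x (List.mem_cons_of_mem _ hx))

theorem nextB_none_all {air : List (Int × Int × Int)} :
    ∀ {st : List (Int × Int × Int)}, nextB air st = none → ∀ c ∈ st, List.contains air c = true
  | [], _, c, hc => by simp at hc
  | x :: st, h, c, hc => by
    rw [nextB] at h
    by_cases hx : List.contains air x = true
    · rw [if_pos hx] at h
      rcases List.mem_cons.mp hc with rfl | hc'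
      · exact hx
      · exact nextB_none_all h c hc'
    · rw [if_neg hx] at h
      cases h

theorem nextB_split {air : List (Int × Int × Int)} :
    ∀ {st cand rest}, nextB air st = some (cand, rest) →
      ∃ pre, st = pre ++ cand :: rest ∧ (∀ c ∈ pre, List.contains air c = true) ∧
        List.contains air cand = false
  | [], _, _, h => by simp [nextB] at h
  | x :: st, cand, rest, h => by
    rw [nextB] at h
    by_cases hx : List.contains air x = true
    · rw [if_pos hx] at h
      obtain ⟨pre, rfl, hpre, hcand⟩ := nextB_split h
      exact ⟨x :: pre, rfl, fun c hc => by
        rcases List.mem_cons.mp hc with rfl | hc'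
        · exact hx
        · exact hpre c hc', hcand⟩
    · rw [if_neg hx] at h
      obtain ⟨rfl, rfl⟩ : x = cand ∧ st = rest := by
        simpa using h
      exact ⟨[], rfl, by simp, by simpa using hx⟩

-- Source B's neighbour scan = reversed eligible members of A's adjacency pushed on the stack,
-- plus the rock-face count of the scanned cell
theorem scanB_eq (rock : List (Int × Int × Int)) (r0 r1 r2 : Int × Int)
    (l : List (Int × Int × Int)) :
    ∀ (st : List (Int × Int × Int)) (sa : Int),
      scanB rock r0 r1 r2 l st sa =
        ((l.filter (fun q => inB r0 r1 r2 q && !rock.contains q)).reverse ++ st,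
          sa + ((l.filter (fun q => inB r0 r1 r2 q && rock.contains q)).length : Int)) := by
  induction l with
  | nil => intro st sa; simp [scanB]
  | cons nb rest ih =>
    intro st sa
    rw [scanB]
    by_cases h1 : inB r0 r1 r2 nb = true
    · by_cases h2 : rock.contains nb = true
      · rw [if_pos h1, if_pos h2, ih st (sa + 1)]
        simp only [List.filter_cons, Prod.mk.injEq]
        rw [if_neg (by rw [h1, h2]; simp), if_pos (by rw [h1, h2]; rfl)]
        constructor
        · rfl
        · simp only [List.length_cons]
          push_cast
          omega
      · rw [if_pos h1, if_neg h2, ih (nb :: st) sa]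
        rw [Bool.not_eq_true] at h2
        simp only [List.filter_cons, Prod.mk.injEq]
        rw [if_pos (by rw [h1, h2]; rfl), if_neg (by rw [h1, h2]; simp)]
        constructor
        · simp
        · rfl
    · rw [if_neg h1, ih st sa]
      rw [Bool.not_eq_true] at h1
      simp only [List.filter_cons, Prod.mk.injEq]
      rw [if_neg (by rw [h1]; simp), if_neg (by rw [h1]; simp)]
      exact ⟨rfl, rfl⟩

theorem neighboursB_eq_rev (p : Int × Int × Int) : neighboursB p = (adjacentA p).reverse := rfl

theorem inB_eq_inRangeA : inB = inRangeA := rfl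

theorem scan1_eq (rock : List (Int × Int × Int)) (r0 r1 r2 : Int × Int) (p : Int × Int × Int)
    (st : List (Int × Int × Int)) (sa : Int) :
    (scanB rock r0 r1 r2 (neighboursB p) st sa).1 =
      (adjacentA p).filter (fun q => inRangeA r0 r1 r2 q && !rock.contains q) ++ st := by
  simp only [scanB_eq, neighboursB_eq_rev, inB_eq_inRangeA, List.filter_reverse,
    List.reverse_reverse]

theorem scan2_eq (rock : List (Int × Int × Int)) (r0 r1 r2 : Int × Int) (p : Int × Int × Int)
    (st : List (Int × Int × Int)) (sa : Int) :
    (scanB rock r0 r1 r2 (neighboursB p) st sa).2 =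
      sa + (((adjacentA p).filter (fun q => inRangeA r0 r1 r2 q && rock.contains q)).length : Int) := by
  simp only [scanB_eq, neighboursB_eq_rev, inB_eq_inRangeA, List.filter_reverse,
    List.length_reverse]

-- one step of drain, driven by nextB
theorem drain_of_nextB_none (rock : List (Int × Int × Int)) (r0 r1 r2 : Int × Int)
    {air st : List (Int × Int × Int)} (sa : Int) (hn : nextB air st = none) :
    drain rock r0 r1 r2 st air sa = (air, sa) :=
  drain_skips rock r0 r1 r2 st air sa (nextB_none_all hn)

theorem drain_of_nextB_some (rock : List (Int × Int × Int)) (r0 r1 r2 : Int × Int)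
    {air st : List (Int × Int × Int)} (sa : Int) {cand : Int × Int × Int}
    {rest : List (Int × Int × Int)} (hn : nextB air st = some (cand, rest)) :
    drain rock r0 r1 r2 st air sa =
      drain rock r0 r1 r2 rest
        (coreVal rock r0 r1 r2 (adjacentA cand) (PySem.Set.add air cand) sa).1
        (coreVal rock r0 r1 r2 (adjacentA cand) (PySem.Set.add air cand) sa).2 := by
  obtain ⟨pre, rfl, hpre, hcand⟩ := nextB_split hn
  rw [drain_append, drain_skips rock r0 r1 r2 pre _ _ hpre]
  rw [drain_cons, if_neg (by rw [hcand]; exact Bool.false_ne_true)]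

-- unfolding goB one step (the stated proof argument h' may be any proof: proof irrelevance)
theorem goB_unfold_none (rock : List (Int × Int × Int)) (r0 r1 r2 : Int × Int)
    (point : Int × Int × Int) (stack air : List (Int × Int × Int)) (sa : Int)
    (hst : ∀ c ∈ stack, inB r0 r1 r2 c = true)
    (hn : nextB (PySem.Set.add air point)
      (scanB rock r0 r1 r2 (neighboursB point) stack sa).1 = none) :
    goB rock r0 r1 r2 point stack air sa hst =
      (PySem.Set.add air point, (scanB rock r0 r1 r2 (neighboursB point) stack sa).2) := by
  rw [goB]
  split
  · rfl
  · next cand rest heq =>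
    rw [hn] at heq
    cases heq

theorem goB_unfold_some (rock : List (Int × Int × Int)) (r0 r1 r2 : Int × Int)
    (point : Int × Int × Int) (stack air : List (Int × Int × Int)) (sa : Int)
    (hst : ∀ c ∈ stack, inB r0 r1 r2 c = true) (cand : Int × Int × Int)
    (rest : List (Int × Int × Int))
    (hn : nextB (PySem.Set.add air point)
      (scanB rock r0 r1 r2 (neighboursB point) stack sa).1 = some (cand, rest))
    (h' : ∀ c ∈ rest, inB r0 r1 r2 c = true) :
    goB rock r0 r1 r2 point stack air sa hst =
      goB rock r0 r1 r2 cand rest (PySem.Set.add air point)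
        (scanB rock r0 r1 r2 (neighboursB point) stack sa).2 h' := by
  rw [goB]
  split
  · next heq =>
    rw [hn] at heq
    cases heq
  · next cand' rest' heq =>
    rw [hn] at heq
    injection heq with h
    injection h with h1 h2
    subst h1
    subst h2
    rfl

-- the central simulation: B's stack loop = A's flood fill of the current cell, then drain of
-- the remaining stack
theorem goB_eq (rock : List (Int × Int × Int)) (r0 r1 r2 : Int × Int)
    (point : Int × Int × Int) (stack air : List (Int × Int × Int)) (sa : Int)
    (hst : ∀ c ∈ stack, inB r0 r1 r2 c = true) :
    goB rock r0 r1 r2 point stack air sa hst =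
      drain rock r0 r1 r2 stack
        (coreVal rock r0 r1 r2 (adjacentA point) (PySem.Set.add air point) sa).1
        (coreVal rock r0 r1 r2 (adjacentA point) (PySem.Set.add air point) sa).2 := by
  induction point, stack, air, sa, hst using goB.induct rock r0 r1 r2 with
  | case1 point stack air sa hst air1 s1 hn =>
    refine (goB_unfold_none rock r0 r1 r2 point stack air sa hst hn).trans ?_
    have hn' : nextB (PySem.Set.add air point)
        ((adjacentA point).filter (fun q => inRangeA r0 r1 r2 q && !rock.contains q) ++ stack) =
        none := by
      rw [← scan1_eq rock r0 r1 r2 point stack sa]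
      exact hn
    conv_rhs => rw [coreVal_eq_drain rock r0 r1 r2 (adjacentA point) (PySem.Set.add air point) 0 sa]
    rw [← drain_append, drain_of_nextB_none rock r0 r1 r2 _ hn', scan2_eq]
  | case2 point stack air sa hst air1 s1 cand rest hn ih =>
    refine (goB_unfold_some rock r0 r1 r2 point stack air sa hst cand rest hn _).trans
      (ih.trans ?_)
    show drain rock r0 r1 r2 rest
        (coreVal rock r0 r1 r2 (adjacentA cand)
          (PySem.Set.add (PySem.Set.add air point) cand)
          ((scanB rock r0 r1 r2 (neighboursB point) stack sa).2)).1
        (coreVal rock r0 r1 r2 (adjacentA cand)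
          (PySem.Set.add (PySem.Set.add air point) cand)
          ((scanB rock r0 r1 r2 (neighboursB point) stack sa).2)).2 =
      drain rock r0 r1 r2 stack
        (coreVal rock r0 r1 r2 (adjacentA point) (PySem.Set.add air point) sa).1
        (coreVal rock r0 r1 r2 (adjacentA point) (PySem.Set.add air point) sa).2
    have hn' : nextB (PySem.Set.add air point)
        ((adjacentA point).filter (fun q => inRangeA r0 r1 r2 q && !rock.contains q) ++ stack) =
        some (cand, rest) := by
      rw [← scan1_eq rock r0 r1 r2 point stack sa]
      exact hn
    conv_rhs => rw [coreVal_eq_drain rock r0 r1 r2 (adjacentA point) (PySem.Set.add air point) 0 sa]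
    rw [← drain_append, drain_of_nextB_some rock r0 r1 r2 _ hn', scan2_eq]

-- ===== VERDICT (by name: the statement is the Claim_ definition above) =====
theorem find_air_spec : Claim_equal_find_air := by
  intro current_point air_points rock_points surface_area valid_range _ hpre
  unfold Pre_find_air at hpre
  unfold Spec_find_air
  obtain ⟨a, b, c, t, rfl⟩ : ∃ a b c t, valid_range = a :: b :: c :: t := by
    rcases valid_range with _ | ⟨a, _ | ⟨b, _ | ⟨c, t⟩⟩⟩ <;> simp at hpre ⊢
  have g0 : PySem.List.pyGet? (a :: b :: c :: t) 0 = some a := by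
    simp [PySem.List.pyGet?, PySem.List.pyIdx?]
    rw [if_pos (by omega)]
    norm_num
  have g1 : PySem.List.pyGet? (a :: b :: c :: t) 1 = some b := by
    simp [PySem.List.pyGet?, PySem.List.pyIdx?]
    rw [if_pos (by omega)]
    norm_num
  have g2 : PySem.List.pyGet? (a :: b :: c :: t) 2 = some c := by
    simp [PySem.List.pyGet?, PySem.List.pyIdx?]
    rw [if_pos (by omega)]
    norm_num
  unfold find_air find_air_alt
  rw [g0, g1, g2]
  dsimp only
  rw [goB_eq, drain_nil]
  exact Prod.mk.eta.symm
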